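-- pv_equiv track=rewrite | github.com/Blue-Peanuts/Ark-A08-Practice | practices/solutions/strings_sol.py | value_of_shortest_key
-- ===== SOURCE A (Python) =====
-- from typing import Dict, List
--
-- def value_of_shortest_key(dic: Dict[str, int]) -> str:
--     """Return the value in dic that correspond to the
--     shortest key in dic.
--
--     Precondition: no keys have the same length, and dic is not empty
--
--     >>> value_of_shortest_key({'Green': 3, 'Blue': 2, 'Red': 1, 'Purple': 2})
--     1
--     """
--     shortest_key = list(dic.keys())[0]
--     ans = dic[shortest_key]
--
--     for key in dic:
--         if len(shortest_key) > len(key):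
--             shortest_key = key
--             ans = dic[key]
--     return ans
-- ===== SOURCE B (Python) =====
-- def value_of_shortest_key(dic):
--     shortest = sorted(dic, key=len)[0]
--     return dic[shortest]
-- ===== Notes on version B (the rewrite author's own statement) =====
-- stated objective: simpler
-- what changed: Replaced the running-minimum scan (first-key seed, strict-> update, lookup carried along) with a stable sort of the keys by length and a single lookup of its first element; stability reproduces A's first-shortest-key tie behaviour.
import Mathlib
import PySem

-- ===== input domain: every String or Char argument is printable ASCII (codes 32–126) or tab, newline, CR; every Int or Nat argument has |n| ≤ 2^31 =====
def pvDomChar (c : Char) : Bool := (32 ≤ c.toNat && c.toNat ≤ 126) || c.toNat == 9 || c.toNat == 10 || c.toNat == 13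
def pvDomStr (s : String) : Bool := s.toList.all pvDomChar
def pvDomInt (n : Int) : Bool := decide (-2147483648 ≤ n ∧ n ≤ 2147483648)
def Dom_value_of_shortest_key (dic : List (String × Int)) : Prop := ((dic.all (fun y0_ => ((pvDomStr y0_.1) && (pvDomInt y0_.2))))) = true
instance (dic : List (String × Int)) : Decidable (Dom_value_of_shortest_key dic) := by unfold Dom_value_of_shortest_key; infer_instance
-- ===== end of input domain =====

-- B replaces A's running-minimum scan with a stable sort of the keys by length and a lookup of the first; simpler, not faster.


-- ===== PORT A =====
def value_of_shortest_key (dic : List (String × Int)) : Int :=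
  let keys := dic.map Prod.fst
  let shortest_key := keys.headD ""          -- list(dic.keys())[0]; Pre_ excludes the empty dict (IndexError)
  let ans := (PySem.Dict.mk dic).getD shortest_key 0   -- dic[shortest_key]; the key is present, so getD's default is never used
  (keys.foldl (fun st key =>
      if PySem.Str.len st.1 > PySem.Str.len key then (key, (PySem.Dict.mk dic).getD key 0) else st)
    (shortest_key, ans)).2

-- ===== PORT B =====
def value_of_shortest_key_alt (dic : List (String × Int)) : Int :=
  let shortest := (PySem.List.sorted (dic.map Prod.fst) PySem.Str.len).headD ""  -- sorted(dic, key=len)[0]; Pre_ excludes empty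
  (PySem.Dict.mk dic).getD shortest 0

-- ===== PRECONDITION & SPEC =====
-- Pre_ excludes only the empty dict, on which Python A raises IndexError (and B does too).
def Pre_value_of_shortest_key (dic : List (String × Int)) : Prop := dic ≠ []
instance (dic : List (String × Int)) : Decidable (Pre_value_of_shortest_key dic) := by unfold Pre_value_of_shortest_key; infer_instance
def pvWitness_value_of_shortest_key : (List (String × Int)) := [("Green", 3), ("Blue", 2), ("Red", 1), ("Purple", 2)]

def Spec_value_of_shortest_key (dic : List (String × Int)) (out : Int) : Prop := out = value_of_shortest_key_alt dic
instance (dic : List (String × Int)) (out : Int) : Decidable (Spec_value_of_shortest_key dic out) := by unfold Spec_value_of_shortest_key; infer_instance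

-- ===== CLAIM (what is proved, stated in full; the proofs are below) =====
def Claim_equal_value_of_shortest_key : Prop := ∀ (dic : List (String × Int)), Dom_value_of_shortest_key dic → Pre_value_of_shortest_key dic → Spec_value_of_shortest_key dic (value_of_shortest_key dic)

-- ===== LEMMAS AND PROOFS =====

-- A's paired fold carries (key, dic[key]); it equals the bare running-min key, looked up at the end.
theorem foldA_eq (f : String → Int) (ks : List String) (s : String) :
    ks.foldl (fun st key =>
        if PySem.Str.len st.1 > PySem.Str.len key then (key, f key) else st) (s, f s)
    = (ks.foldl (fun h k => if PySem.Str.len h > PySem.Str.len k then k else h) s,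
       f (ks.foldl (fun h k => if PySem.Str.len h > PySem.Str.len k then k else h) s)) := by
  induction ks generalizing s with
  | nil => rfl
  | cons k t ih =>
    simp only [List.foldl]
    by_cases h : PySem.Str.len s > PySem.Str.len k
    · simp only [h, if_pos]; exact ih k
    · simp only [h, if_false]; exact ih s

-- the head of the stable insertion sort built from a nonempty accumulator is the first key of minimal length
theorem foldS_head (ks : List String) (a : String) (t : List String) :
    ∃ u, ks.foldl (fun acc x =>
          PySem.List.insertBy (fun p q => decide (PySem.Str.len p < PySem.Str.len q)) x acc) (a :: t)
        = (ks.foldl (fun h k => if PySem.Str.len h > PySem.Str.len k then k else h) a) :: u := by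
  induction ks generalizing a t with
  | nil => exact ⟨t, rfl⟩
  | cons x ks ih =>
    simp only [List.foldl, PySem.List.insertBy]
    by_cases h : PySem.Str.len x < PySem.Str.len a
    · simp only [h, decide_true, if_pos, gt_iff_lt]
      exact ih x (a :: t)
    · simp only [h, decide_false, Bool.false_eq_true, if_false, gt_iff_lt]
      exact ih a _

-- ===== VERDICT (by name: the statement is the Claim_ definition above) =====
theorem value_of_shortest_key_spec : Claim_equal_value_of_shortest_key := by
  intro dic _ hpre
  unfold Spec_value_of_shortest_key value_of_shortest_key value_of_shortest_key_alt
  cases dic with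
  | nil => exact absurd rfl hpre
  | cons p rest =>
    simp only [List.map_cons, List.headD_cons]
    rw [PySem.List.sorted_eq_foldl_insertBy]
    simp only [List.foldl, PySem.List.insertBy]
    obtain ⟨u, hu⟩ := foldS_head (rest.map Prod.fst) p.1 []
    rw [hu, List.headD_cons]
    rw [ite_self, foldA_eq (fun k => (PySem.Dict.mk (p :: rest)).getD k 0)]
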